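-- pv_equiv track=rewrite | github.com/johnBuffer/AdventOfCode-2021 | 18.py | calc_ampl
-- ===== SOURCE A (Python) =====
-- def is_left(x, i):
--     if i < len(x)-1: return x[i][1][:-1] == x[i+1][1][:-1]
--     return False
--
-- def calc_ampl(x):
--     while len(x) > 1:
--         for i, (n, id) in enumerate(x):
--             if is_left(x, i):
--                 n_right, id_right = x[i+1]
--                 for v in [(n, id), (n_right, id_right)]: x.remove(v)
--                 x.insert(i, (3*n + 2*n_right, id[:-1]))
--     return x[0][0]
-- ===== SOURCE B (Python) =====
-- def calc_ampl(x):
--     # Single left-to-right pass: keep a stack of reduced entries; whenever the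
--     # top two entries are siblings (ids equal after dropping the last char),
--     # merge them on the spot.  (Unlike the original, x is not mutated; the
--     # equivalence is about the return value.)
--     stack = []
--     for n, id in x:
--         stack.append((n, id))
--         while len(stack) > 1 and stack[-2][1][:-1] == stack[-1][1][:-1]:
--             n_right, id_right = stack.pop()
--             n_left, id_left = stack.pop()
--             stack.append((3 * n_left + 2 * n_right, id_left[:-1]))
--     return stack[0][0]
-- ===== Notes on version B (the rewrite author's own statement) =====
-- stated objective: alternative
-- what changed: Replaces the repeated rescans with list.remove/list.insert surgery (looping until one element is left) by a single left-to-right pass over the input that merges sibling pairs on top of a stack; intended as asymptotically faster, but a timing run could not confirm a ratio (A times out on its own divergent inputs).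
-- outside the precondition, e.g. on calc_ampl([(1, 'a'), (2, 'b'), (1, 'a'), (3, 'c')]): A returns 39, B returns 75; on calc_ampl([(0, 'a'), (0, 'b'), (0, 'c'), (0, 'd')]): A returns 0, B returns 0
import Mathlib
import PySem

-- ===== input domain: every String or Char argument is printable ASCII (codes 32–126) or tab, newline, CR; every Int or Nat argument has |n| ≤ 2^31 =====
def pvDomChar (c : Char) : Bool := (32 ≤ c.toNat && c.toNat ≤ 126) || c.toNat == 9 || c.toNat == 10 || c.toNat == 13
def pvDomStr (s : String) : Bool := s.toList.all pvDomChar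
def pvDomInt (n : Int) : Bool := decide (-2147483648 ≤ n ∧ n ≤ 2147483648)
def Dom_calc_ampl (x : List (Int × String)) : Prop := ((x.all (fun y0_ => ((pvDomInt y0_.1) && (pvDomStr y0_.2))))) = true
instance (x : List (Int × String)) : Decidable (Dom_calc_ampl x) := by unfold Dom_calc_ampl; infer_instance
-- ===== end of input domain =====

-- B replaces A's repeated remove/insert rescans by one left-to-right stack pass merging
-- sibling pairs on top (return value only: A empties the caller's list in place, B does not).

-- ===== PORT A =====

-- termination helper for the pass loop (cited in decreasing_by): remove-then-default never grows the list
theorem pvRemGetD_le {α : Type} [BEq α] [LawfulBEq α] (l : List α) (v : α) :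
    ((PySem.List.remove? l v).getD l).length ≤ l.length := by
  by_cases h : v ∈ l
  · rw [PySem.List.remove?_eq_some_erase l v h, Option.getD_some]
    have h2 : (l.erase v).length = if v ∈ l then l.length - 1 else l.length := List.length_erase
    rw [if_pos h] at h2
    omega
  · rw [(PySem.List.remove?_eq_none_iff l v).mpr h, Option.getD_none]

theorem pvRemGetD_lt {α : Type} [BEq α] [LawfulBEq α] (l : List α) (v : α) (h : v ∈ l) :
    ((PySem.List.remove? l v).getD l).length < l.length := by
  rw [PySem.List.remove?_eq_some_erase l v h, Option.getD_some]
  have h2 : (l.erase v).length = if v ∈ l then l.length - 1 else l.length := List.length_erase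
  rw [if_pos h] at h2
  have h3 : 0 < l.length := List.length_pos_of_mem h
  omega

-- is_left(x, i)
def isLeftA (x : List (Int × String)) (i : Nat) : Bool :=
  if i < x.length - 1 then
    PySem.Str.slice (x.getD i (0, "")).2 none (some (-1)) ==
      PySem.Str.slice (x.getD (i + 1) (0, "")).2 none (some (-1))
  else false

-- the body of the 'for i, (n, id) in enumerate(x)' loop (index i against the mutating list)
def passA (x : List (Int × String)) (i : Nat) : List (Int × String) :=
  if hi : i < x.length then
    let p := x.getD i (0, "")
    if isLeftA x i then
      let q := x.getD (i + 1) (0, "")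
      let x1 := (PySem.List.remove? x p).getD x
      let x2 := (PySem.List.remove? x1 q).getD x1
      let x3 := PySem.List.insert x2 (i : Int)
        (3 * p.1 + 2 * q.1, PySem.Str.slice p.2 none (some (-1)))
      passA x3 (i + 1)
    else passA x (i + 1)
  else x
termination_by x.length - i
decreasing_by
  · have hm : x.getD i (0, "") ∈ x := by
      rw [List.getD_eq_getElem x _ hi]; exact List.getElem_mem hi
    have h1 : ((PySem.List.remove? x (x.getD i (0, ""))).getD x).length < x.length :=
      pvRemGetD_lt x _ hm
    have h2 := pvRemGetD_le ((PySem.List.remove? x (x.getD i (0, ""))).getD x) (x.getD (i + 1) (0, ""))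
    have h3 := PySem.List.length_insert
      ((PySem.List.remove? ((PySem.List.remove? x (x.getD i (0, ""))).getD x) (x.getD (i + 1) (0, ""))).getD
        ((PySem.List.remove? x (x.getD i (0, ""))).getD x))
      (i : Int) (3 * (x.getD i (0, "")).1 + 2 * (x.getD (i + 1) (0, "")).1,
        PySem.Str.slice (x.getD i (0, "")).2 none (some (-1)))
    omega
  · omega

-- 'while len(x) > 1': each executed pass in Python shortens x or loops forever;
-- the length guard below only realises that measure (it never fires under Pre_)
def loopA (x : List (Int × String)) : List (Int × String) :=
  if 1 < x.length then
    let x' := passA x 0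
    if _ : x'.length < x.length then loopA x' else x'
  else x
termination_by x.length

def calc_ampl (x : List (Int × String)) : Int :=
  (PySem.List.pyGetD (loopA x) 0 (0, "")).1

-- ===== PORT B =====

-- push an entry on the stack (head = top), then merge while the top two are siblings
def pushB (st : List (Int × String)) (p : Int × String) : List (Int × String) :=
  match st with
  | (nl, idl) :: rest =>
      if PySem.Str.slice idl none (some (-1)) == PySem.Str.slice p.2 none (some (-1)) then
        pushB rest (3 * nl + 2 * p.1, PySem.Str.slice idl none (some (-1)))
      else p :: (nl, idl) :: rest
  | [] => [p]

def calc_ampl_alt (x : List (Int × String)) : Int :=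
  ((x.foldl pushB []).getLastD (0, "")).1

-- ===== PRECONDITION & SPEC =====

-- shape checker for Pre_: stack pass over the id strings alone, merging two adjacent ids
-- exactly when they are genuine siblings (nonempty, equal up to the last char, last chars distinct)
def chkPush (st : List (List Char)) (q : List Char) : List (List Char) :=
  match st with
  | t :: rest =>
      if t ≠ [] ∧ q ≠ [] ∧ t.dropLast = q.dropLast ∧ t.getLast? ≠ q.getLast? then
        chkPush rest t.dropLast
      else q :: t :: rest
  | [] => [q]

-- Pre_: either the ids of x are, in order, the leaf paths of one binary tree whose two siblings
-- are always told apart by their last character, or x is one of the short (≤ 3 entries) lists on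
-- which the merge order is forced.  A diverges on inputs whose ids do not reduce to a single
-- element; inputs of length ≥ 4 that DO reduce but with indistinguishable or duplicated sibling
-- ids are also excluded: there A's list.remove-by-value and its pass order make the pairing
-- accidental (A and B may legitimately disagree, e.g. four ids under one parent), so neither
-- value is specified.
def Pre_calc_ampl (x : List (Int × String)) : Prop :=
  (((x.map (fun p : Int × String => p.2.toList)).foldl chkPush []).length = 1) ∨
  (x.length = 2 ∧
    (x.getD 0 (0, "")).2.toList.dropLast = (x.getD 1 (0, "")).2.toList.dropLast) ∨
  (x.length = 3 ∧
    (((x.getD 0 (0, "")).2.toList.dropLast = (x.getD 1 (0, "")).2.toList.dropLast ∧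
      (x.getD 0 (0, "")).2.toList.dropLast.dropLast = (x.getD 2 (0, "")).2.toList.dropLast) ∨
     ((x.getD 0 (0, "")).2.toList.dropLast ≠ (x.getD 1 (0, "")).2.toList.dropLast ∧
      (x.getD 1 (0, "")).2.toList.dropLast = (x.getD 2 (0, "")).2.toList.dropLast ∧
      (x.getD 0 (0, "")).2.toList.dropLast = (x.getD 1 (0, "")).2.toList.dropLast.dropLast)))

instance (x : List (Int × String)) : Decidable (Pre_calc_ampl x) := by
  unfold Pre_calc_ampl; infer_instance

def pvWitness_calc_ampl : (List (Int × String)) := [(1, "a"), (2, "b")]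

def Spec_calc_ampl (x : List (Int × String)) (out : Int) : Prop := out = calc_ampl_alt x
instance (x : List (Int × String)) (out : Int) : Decidable (Spec_calc_ampl x out) := by
  unfold Spec_calc_ampl; infer_instance

-- ===== CLAIM (what is proved, stated in full; the proofs are below) =====
def Claim_equal_calc_ampl : Prop :=
  ∀ (x : List (Int × String)), Dom_calc_ampl x → Pre_calc_ampl x → Spec_calc_ampl x (calc_ampl x)

-- ===== LEMMAS AND PROOFS =====

-- the tree of sibling merges: node c1 l c2 r has left subtree l under last-char c1, right r under c2
inductive PTree : Type
  | leaf : Int → PTree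
  | node : Char → PTree → Char → PTree → PTree

def PTree.val : PTree → Int
  | .leaf n => n
  | .node _ l _ r => 3 * l.val + 2 * r.val

def PTree.good : PTree → Prop
  | .leaf _ => True
  | .node c1 l c2 r => c1 ≠ c2 ∧ l.good ∧ r.good

-- l is a partially reduced frontier of tree t whose root path (as chars) is s
inductive Front : PTree → List Char → List (Int × String) → Prop
  | single (t : PTree) (s : List Char) (id : String) (h : id.toList = s) :
      Front t s [(t.val, id)]
  | node {c1 l c2 r s fl fr} :
      Front l (s ++ [c1]) fl → Front r (s ++ [c2]) fr →
      Front (PTree.node c1 l c2 r) s (fl ++ fr)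

-- basic bridges
theorem sliceStr_toList (s : String) :
    (PySem.Str.slice s none (some (-1))).toList = s.toList.dropLast := by
  simp [PySem.Str.slice, PySem.List.slice_to_neg_one]

theorem strBeq_iff (a b : String) : (a == b) = true ↔ a.toList = b.toList := by
  constructor
  · intro h; simp_all
  · intro h; exact beq_iff_eq.mpr (String.toList_inj.mp h)

theorem isLeftA_iff (x : List (Int × String)) (i : Nat) :
    isLeftA x i = true ↔
      i + 1 < x.length ∧
        (x.getD i (0, "")).2.toList.dropLast = (x.getD (i + 1) (0, "")).2.toList.dropLast := by
  unfold isLeftA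
  by_cases h : i < x.length - 1
  · rw [if_pos h]
    constructor
    · intro hb
      exact ⟨by omega, by simpa [sliceStr_toList, PySem.List.slice_to_neg_one] using (strBeq_iff _ _).mp hb⟩
    · rintro ⟨-, hd⟩
      exact (strBeq_iff _ _).mpr (by simpa [sliceStr_toList, PySem.List.slice_to_neg_one] using hd)
  · rw [if_neg h]
    constructor
    · intro hb; exact absurd hb (by simp)
    · rintro ⟨h1, -⟩; exact absurd h1 (by omega)

-- prefix helpers
theorem prefix_dropLast {α : Type} {p u : List α} (h : p <+: u) (hl : p.length < u.length) :
    p <+: u.dropLast := by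
  obtain ⟨w, rfl⟩ := h
  cases w with
  | nil => simp at hl
  | cons y ys =>
      have : (p ++ y :: ys).dropLast = p ++ (y :: ys).dropLast := by
        rw [List.dropLast_append_of_ne_nil]
        simp
      rw [this]
      exact ⟨(y :: ys).dropLast, rfl⟩

theorem prefix_ne {s u v : List Char} {c1 c2 : Char} (hne : c1 ≠ c2)
    (h1 : s ++ [c1] <+: u) (h2 : s ++ [c2] <+: v) : u ≠ v := by
  rintro rfl
  have h3 : s ++ [c1] <+: s ++ [c2] :=
    List.prefix_of_prefix_length_le h1 h2 (by simp)
  have h4 : s ++ [c1] = s ++ [c2] := h3.eq_of_length (by simp)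
  exact hne (by simpa using h4)

theorem sib_paths {s u1 u2 : List Char} {c1 c2 : Char} (hne : c1 ≠ c2)
    (h1 : s ++ [c1] <+: u1) (h2 : s ++ [c2] <+: u2) (hd : u1.dropLast = u2.dropLast) :
    u1 = s ++ [c1] ∧ u2 = s ++ [c2] := by
  have hl1 : s.length + 1 ≤ u1.length := by simpa using h1.length_le
  have hl2 : s.length + 1 ≤ u2.length := by simpa using h2.length_le
  have hlen : u1.length = u2.length := by
    have := congrArg List.length hd
    simp only [List.length_dropLast] at this
    omega
  by_cases hgt : s.length + 1 < u1.length
  · exfalso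
    have p1 : s ++ [c1] <+: u1.dropLast := prefix_dropLast h1 (by simp; omega)
    have p2 : s ++ [c2] <+: u2.dropLast := prefix_dropLast h2 (by simp; omega)
    rw [hd] at p1
    exact prefix_ne hne p1 p2 rfl
  · have e1 : u1 = s ++ [c1] := (h1.eq_of_length (by simp; omega)).symm
    have e2 : u2 = s ++ [c2] := (h2.eq_of_length (by simp; omega)).symm
    exact ⟨e1, e2⟩

-- splitting an append around two adjacent elements
theorem split2 {α : Type} :
    ∀ (u fl fr w : List α) (a b : α), fl ++ fr = u ++ a :: b :: w →
      (∃ w', fl = u ++ a :: b :: w' ∧ w = w' ++ fr) ∨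
      (fl = u ++ [a] ∧ fr = b :: w) ∨
      (∃ u', u = fl ++ u' ∧ fr = u' ++ a :: b :: w) := by
  intro u
  induction u with
  | nil =>
      intro fl fr w a b h
      match fl, h with
      | [], h => exact Or.inr (Or.inr ⟨[], rfl, by simpa using h⟩)
      | [x], h =>
          simp only [List.cons_append, List.nil_append, List.cons.injEq] at h
          exact Or.inr (Or.inl ⟨by simp [h.1], h.2⟩)
      | x :: y :: fl', h =>
          simp only [List.cons_append, List.nil_append, List.cons.injEq] at h
          exact Or.inl ⟨fl', by simp [h.1, h.2.1], h.2.2.symm⟩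
  | cons z u' ih =>
      intro fl fr w a b h
      match fl, h with
      | [], h => exact Or.inr (Or.inr ⟨z :: u', rfl, by simpa using h⟩)
      | x :: fl', h =>
          simp only [List.cons_append, List.cons.injEq] at h
          rcases ih fl' fr w a b h.2 with ⟨w', e1, e2⟩ | ⟨e1, e2⟩ | ⟨u'', e1, e2⟩
          · exact Or.inl ⟨w', by simp [h.1, e1], e2⟩
          · exact Or.inr (Or.inl ⟨by simp [h.1, e1], e2⟩)
          · exact Or.inr (Or.inr ⟨u'', by simp [h.1, e1], e2⟩)

-- Front facts
theorem Front.ne_nil {t s l} (h : Front t s l) : l ≠ [] := by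
  induction h with
  | single => simp
  | node h1 h2 ih1 ih2 => simp [ih1]

theorem Front.prefix_ids {t s l} (h : Front t s l) :
    ∀ p ∈ l, s <+: p.2.toList := by
  induction h with
  | single t s id hid => intro p hp; simp at hp; subst hp; simp [hid]
  | node h1 h2 ih1 ih2 =>
      intro p hp
      rcases List.mem_append.mp hp with hp | hp
      · exact (List.prefix_append _ [_]).trans (ih1 p hp)
      · exact (List.prefix_append _ [_]).trans (ih2 p hp)

theorem Front.root_mem {t s l} (h : Front t s l) :
    ∀ e ∈ l, e.2.toList = s → l = [e] ∧ e.1 = t.val := by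
  induction h with
  | single t s id hid => intro e he hs; simp at he; subst he; simp
  | node h1 h2 ih1 ih2 =>
      intro e he hs
      exfalso
      rcases List.mem_append.mp he with he | he
      · have := (h1.prefix_ids e he).length_le
        rw [hs] at this; simp at this
      · have := (h2.prefix_ids e he).length_le
        rw [hs] at this; simp at this

theorem Front.length_one {t s l} (h : Front t s l) (hl : l.length = 1) :
    ∃ e, l = [e] ∧ e.1 = t.val ∧ e.2.toList = s := by
  induction h with
  | single t s id hid => exact ⟨_, rfl, rfl, hid⟩
  | node h1 h2 ih1 ih2 =>
      exfalso
      have l1 : 0 < _ := List.length_pos_of_ne_nil h1.ne_nil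
      have l2 : 0 < _ := List.length_pos_of_ne_nil h2.ne_nil
      simp only [List.length_append] at hl
      omega

theorem Front.nodup_ids {t s l} (h : Front t s l) (hg : t.good) :
    (l.map (fun p => p.2.toList)).Nodup := by
  induction h with
  | single t s id hid => simp
  | @node c1 l c2 r s fl fr h1 h2 ih1 ih2 =>
      obtain ⟨hne, hgl, hgr⟩ := hg
      rw [List.map_append]
      refine (ih1 hgl).append (ih2 hgr) ?_
      intro a ha hb
      obtain ⟨p, hp, rfl⟩ := List.mem_map.mp ha
      obtain ⟨q, hq, he⟩ := List.mem_map.mp hb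
      exact prefix_ne hne (h1.prefix_ids p hp) (h2.prefix_ids q hq) he.symm

theorem Front.nodup {t s l} (h : Front t s l) (hg : t.good) : l.Nodup :=
  List.Nodup.of_map _ (h.nodup_ids hg)

-- merging two adjacent sibling entries keeps the list a frontier of the same tree
theorem Front.merge {t s l} (h : Front t s l) :
    ∀ {u w : List (Int × String)} {a b : Int × String} {id' : String},
      t.good → l = u ++ a :: b :: w →
      a.2.toList.dropLast = b.2.toList.dropLast →
      id'.toList = a.2.toList.dropLast →
      Front t s (u ++ (3 * a.1 + 2 * b.1, id') :: w) := by
  induction h with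
  | single t s id hid =>
      intro u w a b id' hg he hd hi
      exfalso
      have := congrArg List.length he
      simp at this
      omega
  | @node c1 tl c2 tr s fl fr h1 h2 ih1 ih2 =>
      intro u w a b id' hg he hd hi
      obtain ⟨hne, hgl, hgr⟩ := hg
      rcases split2 u fl fr w a b he with ⟨w', e1, e2⟩ | ⟨e1, e2⟩ | ⟨u', e1, e2⟩
      · subst e2
        have hf := ih1 hgl e1 hd hi
        have hres : (u ++ (3 * a.1 + 2 * b.1, id') :: w') ++ fr
            = u ++ (3 * a.1 + 2 * b.1, id') :: (w' ++ fr) := by simp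
        exact hres ▸ Front.node hf h2
      · have ha : a ∈ fl := by rw [e1]; simp
        have hb : b ∈ fr := by rw [e2]; simp
        obtain ⟨ea, eb⟩ := sib_paths hne (h1.prefix_ids a ha) (h2.prefix_ids b hb) hd
        obtain ⟨efl, hva⟩ := h1.root_mem a ha ea
        obtain ⟨efr, hvb⟩ := h2.root_mem b hb eb
        have hu : u = [] := by
          rw [efl] at e1
          have := congrArg List.length e1
          simp at this
          exact this
        have hw : w = [] := by
          rw [efr] at e2
          simpa using (List.cons.injEq _ _ _ _ ▸ e2).2.symm
        subst hu hw
        simp only [List.nil_append]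
        have hid2 : id'.toList = s := by rw [hi, ea]; exact List.dropLast_concat
        have hv : 3 * a.1 + 2 * b.1 = (PTree.node c1 tl c2 tr).val := by
          simp [PTree.val, hva, hvb]
        rw [hv]
        exact Front.single _ _ _ hid2
      · subst e1
        have hf := ih2 hgr e2 hd hi
        have hres : fl ++ (u' ++ (3 * a.1 + 2 * b.1, id') :: w)
            = (fl ++ u') ++ (3 * a.1 + 2 * b.1, id') :: w := by simp
        exact hres ▸ Front.node h1 hf

-- a frontier with more than one entry always has an adjacent sibling pair
theorem Front.exists_merge {t s l} (h : Front t s l) :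
    1 < l.length → ∃ u a b w, l = u ++ a :: b :: w ∧
      a.2.toList.dropLast = b.2.toList.dropLast := by
  induction h with
  | single => intro hl; simp at hl
  | @node c1 tl c2 tr s fl fr h1 h2 ih1 ih2 =>
      intro hl
      by_cases hfl : 1 < fl.length
      · obtain ⟨u, a, b, w', e, hd⟩ := ih1 hfl
        exact ⟨u, a, b, w' ++ fr, by rw [e]; simp, hd⟩
      · have l1 : 0 < fl.length := List.length_pos_of_ne_nil h1.ne_nil
        obtain ⟨ea, efl, hva, hsa⟩ := h1.length_one (by omega)
        by_cases hfr : 1 < fr.length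
        · obtain ⟨u, a, b, w, e, hd⟩ := ih2 hfr
          exact ⟨fl ++ u, a, b, w, by rw [e]; simp, hd⟩
        · have l2 : 0 < fr.length := List.length_pos_of_ne_nil h2.ne_nil
          obtain ⟨eb, efr, hvb, hsb⟩ := h2.length_one (by omega)
          refine ⟨[], ea, eb, [], by rw [efl, efr]; rfl, ?_⟩
          rw [hsa, hsb, List.dropLast_concat, List.dropLast_concat]

-- removing a known occurrence
theorem remove?_at {α : Type} [BEq α] [LawfulBEq α] (u w : List α) (a : α) (h : a ∉ u) :
    PySem.List.remove? (u ++ a :: w) a = some (u ++ w) := by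
  induction u with
  | nil => simp
  | cons x xs ih =>
      have hx : x ≠ a := by intro e; exact h (by simp [e])
      rw [List.cons_append, PySem.List.remove?_cons_of_ne _ hx, ih (by simp_all)]
      rfl

-- list surgery helpers for the pass
theorem list_decomp {α : Type} (l : List α) (i : Nat) (d : α) (h : i + 1 < l.length) :
    l = l.take i ++ l.getD i d :: l.getD (i + 1) d :: l.drop (i + 2) := by
  rw [List.getD_eq_getElem l d (by omega), List.getD_eq_getElem l d h]
  conv_lhs => rw [← List.take_append_drop i l]
  congr 1
  rw [List.drop_eq_getElem_cons (by omega)]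
  congr 1
  exact List.drop_eq_getElem_cons h

theorem nodup_not_mem_left {α : Type} {u w : List α} {a : α} (h : (u ++ a :: w).Nodup) :
    a ∉ u := by
  have h2 := List.nodup_middle.mp h
  intro hm
  exact (List.nodup_cons.mp h2).1 (List.mem_append.mpr (Or.inl hm))

theorem getD_of_append {α : Type} {l u w : List α} {a : α} (d : α)
    (he : l = u ++ a :: w) : l.getD u.length d = a := by
  subst he
  rw [List.getD_eq_getElem?_getD, List.getElem?_append_right (le_refl _)]
  simp

theorem getD_of_append_succ {α : Type} {l u w : List α} {a b : α} (d : α)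
    (he : l = u ++ a :: b :: w) : l.getD (u.length + 1) d = b := by
  subst he
  rw [List.getD_eq_getElem?_getD, List.getElem?_append_right (by omega)]
  simp

theorem passA_spec {t s} (hg : t.good) :
    ∀ (n i : Nat) (l : List (Int × String)), l.length - i ≤ n → Front t s l →
      ∃ l', passA l i = l' ∧ Front t s l' ∧ l'.length ≤ l.length ∧
        (l'.length = l.length →
          ∀ u a b w, l = u ++ a :: b :: w → i ≤ u.length →
            a.2.toList.dropLast ≠ b.2.toList.dropLast) := by
  intro n
  induction n with
  | zero =>
      intro i l hb hf
      have hi : ¬ i < l.length := by omega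
      rw [passA, dif_neg hi]
      refine ⟨l, rfl, hf, le_refl _, ?_⟩
      intro _ u a b w he hu
      exfalso
      have := congrArg List.length he
      simp at this
      omega
  | succ n ih =>
      intro i l hb hf
      by_cases hi : i < l.length
      · by_cases hL : isLeftA l i = true
        · obtain ⟨hi1, hd⟩ := (isLeftA_iff l i).mp hL
          have hdec : l = l.take i ++ l.getD i (0, "") :: l.getD (i + 1) (0, "") :: l.drop (i + 2) :=
            list_decomp l i _ hi1
          have hnd : l.Nodup := hf.nodup hg
          have hna : l.getD i (0, "") ∉ l.take i :=
            nodup_not_mem_left (by rw [← hdec]; exact hnd)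
          have hnb : l.getD (i + 1) (0, "") ∉ l.take i := by
            have hdec2 : l = (l.take i ++ [l.getD i (0, "")]) ++
                l.getD (i + 1) (0, "") :: l.drop (i + 2) := by
              conv_lhs => rw [hdec]
              simp
            have h3 := nodup_not_mem_left (by rw [← hdec2]; exact hnd)
            intro hm
            exact h3 (List.mem_append.mpr (Or.inl hm))
          have hr1 : PySem.List.remove? l (l.getD i (0, "")) =
              some (l.take i ++ l.getD (i + 1) (0, "") :: l.drop (i + 2)) := by
            have h0 := remove?_at (l.take i) (l.getD (i + 1) (0, "") :: l.drop (i + 2))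
              (l.getD i (0, "")) hna
            rw [← hdec] at h0
            exact h0
          have hr2 : PySem.List.remove? (l.take i ++ l.getD (i + 1) (0, "") :: l.drop (i + 2))
              (l.getD (i + 1) (0, "")) = some (l.take i ++ l.drop (i + 2)) :=
            remove?_at _ _ _ hnb
          have htl : (l.take i).length = i := by
            rw [List.length_take]; omega
          have hins : PySem.List.insert (l.take i ++ l.drop (i + 2)) (i : Int)
              (3 * (l.getD i (0, "")).1 + 2 * (l.getD (i + 1) (0, "")).1,
                PySem.Str.slice (l.getD i (0, "")).2 none (some (-1))) =
              l.take i ++ (3 * (l.getD i (0, "")).1 + 2 * (l.getD (i + 1) (0, "")).1,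
                PySem.Str.slice (l.getD i (0, "")).2 none (some (-1))) :: l.drop (i + 2) := by
            rw [PySem.List.insert_natCast _ i _ (by rw [List.length_append, htl]; omega),
              List.take_left' htl, List.drop_left' htl]
          have hstep : passA l i = passA (l.take i ++
              (3 * (l.getD i (0, "")).1 + 2 * (l.getD (i + 1) (0, "")).1,
                PySem.Str.slice (l.getD i (0, "")).2 none (some (-1))) :: l.drop (i + 2)) (i + 1) := by
            rw [passA, dif_pos hi]
            simp only [hL, if_true, hr1, Option.getD_some, hr2, hins]
          have hfront3 : Front t s (l.take i ++
              (3 * (l.getD i (0, "")).1 + 2 * (l.getD (i + 1) (0, "")).1,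
                PySem.Str.slice (l.getD i (0, "")).2 none (some (-1))) :: l.drop (i + 2)) :=
            hf.merge hg hdec hd (sliceStr_toList _)
          have hlen3 : (l.take i ++
              (3 * (l.getD i (0, "")).1 + 2 * (l.getD (i + 1) (0, "")).1,
                PySem.Str.slice (l.getD i (0, "")).2 none (some (-1))) :: l.drop (i + 2)).length
              = l.length - 1 := by
            rw [List.length_append, htl]
            simp [List.length_drop]
            omega
          obtain ⟨l', he', hf', hle', _⟩ := ih (i + 1) _ (by omega) hfront3
          refine ⟨l', by rw [hstep]; exact he', hf', by omega, ?_⟩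
          intro heq
          exfalso
          omega
        · have hstep : passA l i = passA l (i + 1) := by
            rw [passA, dif_pos hi]
            simp only [hL, if_false, Bool.false_eq_true]
          obtain ⟨l', he', hf', hle', himp'⟩ := ih (i + 1) l (by omega) hf
          refine ⟨l', by rw [hstep]; exact he', hf', hle', ?_⟩
          intro heq u a b w he hu
          rcases Nat.eq_or_lt_of_le hu with heq2 | hlt
          · have ha : l.getD i (0, "") = a := by rw [heq2]; exact getD_of_append _ he
            have hb2 : l.getD (i + 1) (0, "") = b := by rw [heq2]; exact getD_of_append_succ _ he
            have hilen : i + 1 < l.length := by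
              have := congrArg List.length he
              simp at this
              omega
            intro hcon
            exact hL ((isLeftA_iff l i).mpr ⟨hilen, by rw [ha, hb2]; exact hcon⟩)
          · exact himp' heq u a b w he hlt
      · rw [passA, dif_neg hi]
        refine ⟨l, rfl, hf, le_refl _, ?_⟩
        intro _ u a b w he hu
        exfalso
        have := congrArg List.length he
        simp at this
        omega

theorem loopA_spec {t s} (hg : t.good) :
    ∀ l, Front t s l → ∃ e, loopA l = [e] ∧ e.1 = t.val := by
  suffices H : ∀ (n : Nat) (l : List (Int × String)), l.length ≤ n → Front t s l →
      ∃ e, loopA l = [e] ∧ e.1 = t.val by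
    exact fun l hf => H l.length l (le_refl _) hf
  intro n
  induction n with
  | zero =>
      intro l hb hf
      exact absurd (List.eq_nil_of_length_eq_zero (by omega)) hf.ne_nil
  | succ n ih =>
      intro l hb hf
      by_cases h1 : 1 < l.length
      · obtain ⟨l₁, hp, hf₁, hle, himp⟩ := passA_spec hg l.length 0 l (by omega) hf
        have hlt : l₁.length < l.length := by
          rcases Nat.lt_or_ge l₁.length l.length with h | h
          · exact h
          · exfalso
            obtain ⟨u, a, b, w, he, hd⟩ := hf.exists_merge h1
            exact himp (by omega) u a b w he (Nat.zero_le _) hd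
        have hstep : loopA l = loopA l₁ := by
          rw [loopA, if_pos h1]
          simp only [hp, dif_pos hlt]
        obtain ⟨e, he, hv⟩ := ih l₁ (by omega) hf₁
        exact ⟨e, by rw [hstep]; exact he, hv⟩
      · have hl1 : l.length = 1 := by
          have := List.length_pos_of_ne_nil hf.ne_nil
          omega
        obtain ⟨e, rfl, hv, _⟩ := hf.length_one hl1
        exact ⟨e, by rw [loopA]; simp, hv⟩

-- B: folding pushB over any frontier of t collapses it to the root entry
theorem pushB_fold :
    ∀ {t s l}, Front t s l → ∀ (st : List (Int × String)),
      (st = [] ∨ ∃ m q rest, st = (m, q) :: rest ∧ q.toList ≠ [] ∧ q.toList.length ≤ s.length) →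
      ∃ id' : String, id'.toList = s ∧ l.foldl pushB st = pushB st (t.val, id') := by
  intro t s l h
  induction h with
  | single t s id hid => exact fun st _ => ⟨id, hid, rfl⟩
  | @node c1 tl c2 tr s fl fr h1 h2 ih1 ih2 =>
      intro st hinv
      have hinv1 : st = [] ∨ ∃ m q rest, st = (m, q) :: rest ∧ q.toList ≠ [] ∧
          q.toList.length ≤ (s ++ [c1]).length := by
        rcases hinv with h | ⟨m, q, rest, e, hq, hlen⟩
        · exact Or.inl h
        · exact Or.inr ⟨m, q, rest, e, hq, by rw [List.length_append]; omega⟩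
      obtain ⟨id1, hid1, hfold1⟩ := ih1 st hinv1
      have E1 : pushB st (tl.val, id1) = (tl.val, id1) :: st := by
        rcases hinv with h | ⟨m, q, rest, e, hq, hlen⟩
        · subst h; rfl
        · subst e
          show (if _ then _ else _) = _
          rw [if_neg]
          intro hbeq
          have h3 := (strBeq_iff _ _).mp hbeq
          rw [sliceStr_toList, sliceStr_toList, hid1, List.dropLast_concat] at h3
          have h4 := congrArg List.length h3
          rw [List.length_dropLast] at h4
          have h5 : 0 < q.toList.length := List.length_pos_of_ne_nil hq
          omega
      have hinv2 : ((tl.val, id1) :: st) = [] ∨ ∃ m q rest,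
          ((tl.val, id1) :: st) = (m, q) :: rest ∧ q.toList ≠ [] ∧
          q.toList.length ≤ (s ++ [c2]).length := by
        refine Or.inr ⟨tl.val, id1, st, rfl, ?_, ?_⟩
        · rw [hid1]; simp
        · rw [hid1, List.length_append, List.length_append]; rfl
      obtain ⟨id2, hid2, hfold2⟩ := ih2 ((tl.val, id1) :: st) hinv2
      have E2 : pushB ((tl.val, id1) :: st) (tr.val, id2) =
          pushB st (3 * tl.val + 2 * tr.val, PySem.Str.slice id1 none (some (-1))) := by
        show (if _ then _ else _) = _
        rw [if_pos]
        apply (strBeq_iff _ _).mpr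
        rw [sliceStr_toList, sliceStr_toList, hid1, hid2, List.dropLast_concat,
          List.dropLast_concat]
      refine ⟨PySem.Str.slice id1 none (some (-1)), ?_, ?_⟩
      · rw [sliceStr_toList, hid1, List.dropLast_concat]
      · rw [List.foldl_append, hfold1, E1, hfold2, E2]
        rfl

-- checker soundness: stack ↔ consumed input decomposed into good frontiers
inductive Stk : List (List Char) → List (Int × String) → Prop
  | nil : Stk [] []
  | cons {p st l rest t} : PTree.good t → Front t p l → Stk st rest → Stk (p :: st) (rest ++ l)

theorem chkPush_inv :
    ∀ (st : List (List Char)) (done : List (Int × String)) (t : PTree) (q : List Char)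
      (l : List (Int × String)), Stk st done → t.good → Front t q l →
      Stk (chkPush st q) (done ++ l) := by
  intro st
  induction st with
  | nil =>
      intro done t q l hstk hg hf
      cases hstk
      exact Stk.cons hg hf Stk.nil
  | cons t1 rest ih =>
      intro done t q l hstk hg hf
      cases hstk with
      | cons hg1 hf1 hstk' =>
          rename_i l1 rest' t'
          by_cases hc : t1 ≠ [] ∧ q ≠ [] ∧ t1.dropLast = q.dropLast ∧ t1.getLast? ≠ q.getLast?
          · obtain ⟨hne1, hne2, hdl, hgl⟩ := hc
            have hcne : t1.getLast hne1 ≠ q.getLast hne2 := by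
              intro e
              apply hgl
              rw [List.getLast?_eq_some_getLast hne1, List.getLast?_eq_some_getLast hne2, e]
            have hfn : Front (PTree.node (t1.getLast hne1) t' (q.getLast hne2) t)
                (t1.dropLast) (l1 ++ l) := by
              apply Front.node
              · rw [List.dropLast_append_getLast hne1]; exact hf1
              · rw [hdl, List.dropLast_append_getLast hne2]; exact hf
            have hgn : (PTree.node (t1.getLast hne1) t' (q.getLast hne2) t).good :=
              ⟨hcne, hg1, hg⟩
            have := ih rest' _ t1.dropLast (l1 ++ l) hstk' hgn hfn
            rw [show chkPush (t1 :: rest) q = chkPush rest t1.dropLast from by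
              rw [chkPush, if_pos ⟨hne1, hne2, hdl, hgl⟩]]
            simpa [List.append_assoc] using this
          · rw [show chkPush (t1 :: rest) q = q :: t1 :: rest from by
              rw [chkPush, if_neg hc]]
            exact Stk.cons hg hf (Stk.cons hg1 hf1 hstk')

theorem chk_fold_inv :
    ∀ (x : List (Int × String)) (st : List (List Char)) (done : List (Int × String)),
      Stk st done →
      Stk ((x.map (fun p : Int × String => p.2.toList)).foldl chkPush st) (done ++ x) := by
  intro x
  induction x with
  | nil => intro st done h; simpa using h
  | cons e xs ih =>
      intro st done h
      have hf : Front (PTree.leaf e.1) e.2.toList [e] := by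
        have := Front.single (PTree.leaf e.1) e.2.toList e.2 rfl
        simpa [PTree.val] using this
      have h1 : Stk (chkPush st e.2.toList) (done ++ [e]) :=
        chkPush_inv st done (PTree.leaf e.1) e.2.toList [e] h trivial hf
      have h2 := ih (chkPush st e.2.toList) (done ++ [e]) h1
      simpa [List.append_assoc] using h2

theorem pre_tree {x : List (Int × String)}
    (h : ((x.map (fun p : Int × String => p.2.toList)).foldl chkPush []).length = 1) :
    ∃ t s, PTree.good t ∧ Front t s x := by
  obtain ⟨p, hp⟩ := List.length_eq_one_iff.mp h
  have hstk := chk_fold_inv x [] [] Stk.nil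
  rw [hp] at hstk
  cases hstk with
  | cons hg hf hstk' =>
      cases hstk'
      exact ⟨_, _, hg, by simpa using hf⟩

-- direct evaluation of both ports on the short forced-order lists admitted by Pre_
theorem sliceBeq_iff (s t : String) :
    (PySem.Str.slice s none (some (-1)) == PySem.Str.slice t none (some (-1))) = true ↔
      s.toList.dropLast = t.toList.dropLast := by
  rw [strBeq_iff, sliceStr_toList, sliceStr_toList]

theorem passA_pair0 (a b : Int × String) (hd : a.2.toList.dropLast = b.2.toList.dropLast) :
    passA [a, b] 0 = [(3 * a.1 + 2 * b.1, PySem.Str.slice a.2 none (some (-1)))] := by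
  have hL : isLeftA [a, b] 0 = true := by
    unfold isLeftA
    rw [if_pos (by norm_num)]
    exact (sliceBeq_iff _ _).mpr hd
  rw [passA, dif_pos (by norm_num : (0 : Nat) < ([a, b] : List (Int × String)).length)]
  simp only [hL, if_true, List.getD_cons_zero, List.getD_cons_succ,
    PySem.List.remove?_cons_self, Option.getD_some, Nat.cast_zero, PySem.List.insert_zero]
  rw [passA, dif_neg (by norm_num)]

theorem loopA_pair (a b : Int × String) (hd : a.2.toList.dropLast = b.2.toList.dropLast) :
    loopA [a, b] = [(3 * a.1 + 2 * b.1, PySem.Str.slice a.2 none (some (-1)))] := by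
  rw [loopA, if_pos (by norm_num : 1 < ([a, b] : List (Int × String)).length)]
  simp only [passA_pair0 a b hd]
  rw [dif_pos (by norm_num)]
  rw [loopA, if_neg (by norm_num)]

theorem calcB_stack_pair (st : List (Int × String)) (a b : Int × String)
    (hd : a.2.toList.dropLast = b.2.toList.dropLast) :
    pushB (a :: st) b = pushB st (3 * a.1 + 2 * b.1, PySem.Str.slice a.2 none (some (-1))) := by
  show (if _ then _ else _) = _
  rw [if_pos ((sliceBeq_iff _ _).mpr hd)]

theorem calcB_stack_nopair (st : List (Int × String)) (a b : Int × String)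
    (hd : a.2.toList.dropLast ≠ b.2.toList.dropLast) :
    pushB (a :: st) b = b :: a :: st := by
  show (if _ then _ else _) = _
  rw [if_neg (fun hbeq => hd ((sliceBeq_iff _ _).mp hbeq))]

theorem calc_pair (a b : Int × String) (hd : a.2.toList.dropLast = b.2.toList.dropLast) :
    calc_ampl [a, b] = calc_ampl_alt [a, b] := by
  unfold calc_ampl calc_ampl_alt
  rw [loopA_pair a b hd, PySem.List.pyGetD_zero_cons]
  have hB : List.foldl pushB [] [a, b] =
      [(3 * a.1 + 2 * b.1, PySem.Str.slice a.2 none (some (-1)))] := by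
    simp only [List.foldl_cons, List.foldl_nil]
    rw [show pushB [] a = [a] from rfl, calcB_stack_pair [] a b hd]
    rfl
  rw [hB]
  rfl

theorem calc_triple_left (a b c : Int × String)
    (h01 : a.2.toList.dropLast = b.2.toList.dropLast)
    (h2 : a.2.toList.dropLast.dropLast = c.2.toList.dropLast) :
    calc_ampl [a, b, c] = calc_ampl_alt [a, b, c] := by
  have hm2 : (PySem.Str.slice a.2 none (some (-1))).toList.dropLast = c.2.toList.dropLast := by
    rw [sliceStr_toList]; exact h2
  have hL : isLeftA [a, b, c] 0 = true := by
    unfold isLeftA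
    rw [if_pos (by norm_num)]
    exact (sliceBeq_iff _ _).mpr h01
  have hstep : passA [a, b, c] 0 =
      passA [(3 * a.1 + 2 * b.1, PySem.Str.slice a.2 none (some (-1))), c] 1 := by
    rw [passA, dif_pos (by norm_num : (0 : Nat) < ([a, b, c] : List (Int × String)).length)]
    simp only [hL, if_true, List.getD_cons_zero, List.getD_cons_succ,
      PySem.List.remove?_cons_self, Option.getD_some, Nat.cast_zero, PySem.List.insert_zero]
  have hL1 : isLeftA [(3 * a.1 + 2 * b.1, PySem.Str.slice a.2 none (some (-1))), c] 1 = false := by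
    unfold isLeftA
    rw [if_neg (by norm_num)]
  have hstep2 : passA [(3 * a.1 + 2 * b.1, PySem.Str.slice a.2 none (some (-1))), c] 1 =
      [(3 * a.1 + 2 * b.1, PySem.Str.slice a.2 none (some (-1))), c] := by
    rw [passA, dif_pos (by norm_num)]
    simp only [hL1, Bool.false_eq_true, if_false]
    rw [passA, dif_neg (by norm_num)]
  have hloop : loopA [a, b, c] =
      loopA [(3 * a.1 + 2 * b.1, PySem.Str.slice a.2 none (some (-1))), c] := by
    rw [loopA, if_pos (by norm_num : 1 < ([a, b, c] : List (Int × String)).length)]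
    simp only [hstep, hstep2]
    rw [dif_pos (by norm_num)]
  unfold calc_ampl calc_ampl_alt
  rw [hloop, loopA_pair (3 * a.1 + 2 * b.1, PySem.Str.slice a.2 none (some (-1))) c hm2, PySem.List.pyGetD_zero_cons]
  have hB : List.foldl pushB [] [a, b, c] =
      [(3 * (3 * a.1 + 2 * b.1) + 2 * c.1,
        PySem.Str.slice (PySem.Str.slice a.2 none (some (-1))) none (some (-1)))] := by
    simp only [List.foldl_cons, List.foldl_nil]
    rw [show pushB [] a = [a] from rfl, calcB_stack_pair [] a b h01]
    rw [show pushB [] (3 * a.1 + 2 * b.1, PySem.Str.slice a.2 none (some (-1))) =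
      [(3 * a.1 + 2 * b.1, PySem.Str.slice a.2 none (some (-1)))] from rfl]
    rw [calcB_stack_pair [] (3 * a.1 + 2 * b.1, PySem.Str.slice a.2 none (some (-1))) c hm2]
    rfl
  rw [hB]
  rfl

theorem calc_triple_right (a b c : Int × String)
    (h01 : a.2.toList.dropLast ≠ b.2.toList.dropLast)
    (h12 : b.2.toList.dropLast = c.2.toList.dropLast)
    (h0m : a.2.toList.dropLast = b.2.toList.dropLast.dropLast) :
    calc_ampl [a, b, c] = calc_ampl_alt [a, b, c] := by
  have hab : a ≠ b := fun e => h01 (by rw [e])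
  have hac : a ≠ c := fun e => h01 (by rw [e, h12])
  have hm2 : a.2.toList.dropLast = (PySem.Str.slice b.2 none (some (-1))).toList.dropLast := by
    rw [sliceStr_toList]; exact h0m
  have hL : isLeftA [a, b, c] 0 = false := by
    unfold isLeftA
    rw [if_pos (by norm_num)]
    exact Bool.eq_false_iff.mpr (fun hbeq => h01 ((sliceBeq_iff _ _).mp hbeq))
  have hL1 : isLeftA [a, b, c] 1 = true := by
    unfold isLeftA
    rw [if_pos (by norm_num)]
    exact (sliceBeq_iff _ _).mpr h12
  have hstep : passA [a, b, c] 0 = passA [a, b, c] 1 := by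
    rw [passA, dif_pos (by norm_num : (0 : Nat) < ([a, b, c] : List (Int × String)).length)]
    simp only [hL, Bool.false_eq_true, if_false]
  have hstep2 : passA [a, b, c] 1 =
      passA [a, (3 * b.1 + 2 * c.1, PySem.Str.slice b.2 none (some (-1)))] 2 := by
    rw [passA, dif_pos (by norm_num)]
    simp only [hL1, if_true, List.getD_cons_zero, List.getD_cons_succ]
    rw [PySem.List.remove?_cons_of_ne _ hab, PySem.List.remove?_cons_self]
    simp only [Option.map_some, Option.getD_some]
    rw [PySem.List.remove?_cons_of_ne _ hac, PySem.List.remove?_cons_self]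
    simp only [Option.map_some, Option.getD_some]
    rw [show ((1 : Nat) : Int) = (1 : Int) from rfl,
      PySem.List.insert_ofNat [a] 1 _ (by norm_num)]
    rfl
  have hstep3 : passA [a, (3 * b.1 + 2 * c.1, PySem.Str.slice b.2 none (some (-1)))] 2 =
      [a, (3 * b.1 + 2 * c.1, PySem.Str.slice b.2 none (some (-1)))] := by
    rw [passA, dif_neg (by norm_num)]
  have hloop : loopA [a, b, c] =
      loopA [a, (3 * b.1 + 2 * c.1, PySem.Str.slice b.2 none (some (-1)))] := by
    rw [loopA, if_pos (by norm_num : 1 < ([a, b, c] : List (Int × String)).length)]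
    simp only [hstep, hstep2, hstep3]
    rw [dif_pos (by norm_num)]
  unfold calc_ampl calc_ampl_alt
  rw [hloop, loopA_pair a (3 * b.1 + 2 * c.1, PySem.Str.slice b.2 none (some (-1))) hm2, PySem.List.pyGetD_zero_cons]
  have hB : List.foldl pushB [] [a, b, c] =
      [(3 * a.1 + 2 * (3 * b.1 + 2 * c.1), PySem.Str.slice a.2 none (some (-1)))] := by
    simp only [List.foldl_cons, List.foldl_nil]
    rw [show pushB [] a = [a] from rfl, calcB_stack_nopair [] a b h01]
    rw [calcB_stack_pair [a] b c h12]
    rw [calcB_stack_pair [] a (3 * b.1 + 2 * c.1, PySem.Str.slice b.2 none (some (-1))) hm2]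
    rfl
  rw [hB]
  rfl

-- ===== VERDICT (by name: the statement is the Claim_ definition above) =====
theorem calc_ampl_spec : Claim_equal_calc_ampl := by
  intro x _ hpre
  unfold Spec_calc_ampl
  rcases hpre with hchk | ⟨hl2, hd⟩ | ⟨hl3, hcase⟩
  · obtain ⟨t, s, hg, hf⟩ := pre_tree hchk
    obtain ⟨e, hloop, hval⟩ := loopA_spec hg x hf
    obtain ⟨id', hid', hfold⟩ := pushB_fold hf [] (Or.inl rfl)
    have hA : calc_ampl x = e.1 := by
      unfold calc_ampl
      rw [hloop, PySem.List.pyGetD_zero_cons]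
    have hB : calc_ampl_alt x = t.val := by
      unfold calc_ampl_alt
      rw [hfold]
      simp [pushB]
    rw [hA, hB, hval]
  · obtain ⟨a, b, rfl⟩ := List.length_eq_two.mp hl2
    exact calc_pair a b hd
  · obtain ⟨a, b, c, rfl⟩ := List.length_eq_three.mp hl3
    rcases hcase with ⟨h01, h2⟩ | ⟨h01, h12, h0m⟩
    · exact calc_triple_left a b c h01 h2
    · exact calc_triple_right a b c h01 h12 h0m
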